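-- pv_equiv track=rewrite | github.com/Spy12150/Poker-Program-1 | server/app/game/hardcode_ai/ai_bladework_v2.py | count_gaps_in_sequence
-- ===== SOURCE A (Python) =====
-- def count_gaps_in_sequence(community):
--     """Count gaps in rank sequence."""
--     rank_values = {'2': 2, '3': 3, '4': 4, '5': 5, '6': 6, '7': 7, '8': 8, '9': 9,
--                    'T': 10, 'J': 11, 'Q': 12, 'K': 13, 'A': 14}
--     values = sorted(list(set([rank_values[card[0]] for card in community])))
--
--     if len(values) < 2:
--         return 0
--
--     gaps = 0
--     for i in range(len(values) - 1):
--         gap_size = values[i+1] - values[i] - 1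
--         gaps += max(0, gap_size)
--
--     return gaps
-- ===== SOURCE B (Python) =====
-- def count_gaps_in_sequence(community):
--     """Count gaps in rank sequence (closed form instead of the adjacent-pair loop)."""
--     rank_values = {'2': 2, '3': 3, '4': 4, '5': 5, '6': 6, '7': 7, '8': 8, '9': 9,
--                    'T': 10, 'J': 11, 'Q': 12, 'K': 13, 'A': 14}
--     s = {rank_values[card[0]] for card in community}
--     if len(s) < 2:
--         return 0
--     return max(s) - min(s) - (len(s) - 1)
-- ===== Notes on version B (the rewrite author's own statement) =====
-- stated objective: simpler
-- what changed: Replaces the sort plus adjacent-pair gap loop by the closed form max(s) - min(s) - (len(s) - 1) over the set of distinct rank values (the per-pair positive gaps of distinct sorted values telescope).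
import Mathlib
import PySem

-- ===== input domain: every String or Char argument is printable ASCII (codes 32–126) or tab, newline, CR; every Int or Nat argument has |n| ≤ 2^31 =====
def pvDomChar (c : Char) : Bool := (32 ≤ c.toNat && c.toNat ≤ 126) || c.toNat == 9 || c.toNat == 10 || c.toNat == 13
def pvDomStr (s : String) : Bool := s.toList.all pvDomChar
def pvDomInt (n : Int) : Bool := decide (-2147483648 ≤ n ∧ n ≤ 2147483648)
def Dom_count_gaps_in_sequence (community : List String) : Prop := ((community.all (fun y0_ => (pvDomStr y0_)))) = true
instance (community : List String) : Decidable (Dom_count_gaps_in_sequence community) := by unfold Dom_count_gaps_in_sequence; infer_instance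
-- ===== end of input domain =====

-- B replaces A's sort + adjacent-gap loop by the telescoped closed form max - min - (len - 1); objective: simpler.

-- ===== PORT A =====
-- the dict literal rank_values (insertion order, distinct keys)
def rankValues : PySem.Dict Char Int :=
  PySem.Dict.mk [('2',2),('3',3),('4',4),('5',5),('6',6),('7',7),('8',8),('9',9),
    ('T',10),('J',11),('Q',12),('K',13),('A',14)]

-- rank_values[card[0]]; the default 0 is unreachable under Pre_ (Python raises there)
def rankOf (card : String) : Int :=
  ((PySem.Str.pyGet? card 0).bind (fun c => PySem.Dict.get? rankValues c)).getD 0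

def count_gaps_in_sequence (community : List String) : Int :=
  let values := PySem.List.sorted (PySem.Set.ofList (community.map rankOf)) (fun x => x) false
  if PySem.List.len values < 2 then 0
  else
    (PySem.List.pyRange 0 (PySem.List.len values - 1) 1).foldl
      (fun gaps i =>
        gaps + max 0 (PySem.List.pyGetD values (i+1) 0 - PySem.List.pyGetD values i 0 - 1)) 0

-- ===== PORT B =====
def count_gaps_in_sequence_alt (community : List String) : Int :=
  let s := PySem.Set.ofList (community.map rankOf)
  if PySem.List.len s < 2 then 0
  else
    (PySem.List.max? s (fun x => x)).getD 0 - (PySem.List.min? s (fun x => x)).getD 0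
      - (PySem.List.len s - 1)

-- ===== PRECONDITION & SPEC =====
-- Pre_ excludes exactly the inputs where Python A raises: a card that is the empty string
-- (IndexError on card[0]) or whose first character is not a rank key (KeyError).
def Pre_count_gaps_in_sequence (community : List String) : Prop :=
  ∀ card ∈ community, card.toList.head?.any
    (fun c => c ∈ (['2','3','4','5','6','7','8','9','T','J','Q','K','A'] : List Char)) = true
instance (community : List String) : Decidable (Pre_count_gaps_in_sequence community) := by
  unfold Pre_count_gaps_in_sequence; infer_instance

def pvWitness_count_gaps_in_sequence : List String := ["2h", "7d", "Ts"]

def Spec_count_gaps_in_sequence (community : List String) (out : Int) : Prop :=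
  out = count_gaps_in_sequence_alt community
instance (community : List String) (out : Int) : Decidable (Spec_count_gaps_in_sequence community out) := by
  unfold Spec_count_gaps_in_sequence; infer_instance

-- ===== CLAIM (what is proved, stated in full; the proofs are below) =====
def Claim_equal_count_gaps_in_sequence : Prop := ∀ (community : List String), Dom_count_gaps_in_sequence community → Pre_count_gaps_in_sequence community → Spec_count_gaps_in_sequence community (count_gaps_in_sequence community)

-- ===== LEMMAS AND PROOFS =====

-- getLastD of a list is a member of the list with its default prepended
lemma getLastD_mem_cons (t : List Int) (a : Int) : t.getLastD a ∈ a :: t := by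
  induction t generalizing a with
  | nil => simp
  | cons b t' ih =>
    rw [List.getLastD_cons]
    have := ih b
    simp at this ⊢
    tauto

-- on a strictly increasing list, getLastD bounds every element
lemma le_getLastD_of_pairwise (t : List Int) (a : Int)
    (hp : (a :: t).Pairwise (· < ·)) : ∀ x ∈ a :: t, x ≤ t.getLastD a := by
  induction t generalizing a with
  | nil => intro x hx; simp at hx; simp [hx]
  | cons b t' ih =>
    intro x hx
    have hab : a < b := (List.pairwise_cons.mp hp).1 b (by simp)
    have hrec := ih b (List.pairwise_cons.mp hp).2
    rw [List.getLastD_cons]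
    have hb := hrec b (by simp)
    rcases List.mem_cons.mp hx with rfl | hx2
    · omega
    · exact hrec x hx2

-- telescoping of the adjacent max-gap sum over a strictly increasing list, as a zip-fold
lemma tele_zip (t : List Int) : ∀ (a g0 : Int), (a :: t).Pairwise (· < ·) →
    ((a :: t).zip t).foldl (fun g p => g + max 0 (p.2 - p.1 - 1)) g0
      = g0 + (t.getLastD a - a - t.length) := by
  induction t with
  | nil => intro a g0 _; simp
  | cons b t' ih =>
    intro a g0 hp
    have hab : a < b := (List.pairwise_cons.mp hp).1 b (by simp)
    have hp' : (b :: t').Pairwise (· < ·) := (List.pairwise_cons.mp hp).2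
    simp only [List.zip_cons_cons, List.foldl_cons]
    rw [ih b (g0 + max 0 (b - a - 1)) hp']
    rw [show max 0 (b - a - 1) = b - a - 1 by omega]
    rw [List.getLastD_cons, List.length_cons]
    push_cast
    ring

-- the index loop over a nonempty list equals the zip-fold over adjacent pairs
lemma idx_loop_eq_zip (l : List Int) (hl : l ≠ []) :
    (PySem.List.pyRange 0 (PySem.List.len l - 1) 1).foldl
      (fun gaps i =>
        gaps + max 0 (PySem.List.pyGetD l (i+1) 0 - PySem.List.pyGetD l i 0 - 1)) 0
      = (l.zip l.tail).foldl (fun g p => g + max 0 (p.2 - p.1 - 1)) 0 := by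
  have hzl : (l.zip l.tail).length = l.length - 1 := by
    simp [List.length_zip, List.length_tail]
  have hlne : 1 ≤ l.length := by
    cases l
    · exact absurd rfl hl
    · simp
  have hlen : PySem.List.len l - 1 = ((l.zip l.tail).length : Int) := by
    simp [PySem.List.len_eq, hzl]
    omega
  rw [hlen]
  rw [← PySem.List.foldl_pyRange_zero_pyGetD' (l.zip l.tail) ((0 : Int), (0 : Int))
    (fun g p => g + max 0 (p.2 - p.1 - 1)) 0]
  apply PySem.List.foldl_congr_mem
  intro acc i hi
  have hmem := (PySem.List.mem_pyRange_one).mp hi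
  have h0 : 0 ≤ i := hmem.1
  have hi' : i < ((l.zip l.tail).length : Int) := hmem.2
  have h1 : i.toNat < l.length := by omega
  have h2 : i.toNat + 1 < l.length := by omega
  have htail : l.tail[i.toNat]'(by simp [List.length_tail]; omega) = l[i.toNat + 1] := by
    simp [List.getElem_tail]
  rw [PySem.List.pyGetD_eq_getElem l (i := i + 1) 0 (by omega) (by exact_mod_cast by omega),
      PySem.List.pyGetD_eq_getElem l (i := i) 0 h0 (by exact_mod_cast by omega),
      PySem.List.pyGetD_eq_getElem (l.zip l.tail) (i := i) (0, 0) h0 (by exact_mod_cast hi')]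
  simp only [show (i + 1).toNat = i.toNat + 1 from by omega, List.getElem_zip, htail]

-- max? / min? over any permutation of a strictly increasing a :: t are getLastD t a and a
lemma max_min_of_perm (s : List Int) (a : Int) (t : List Int)
    (hperm : (a :: t).Perm s) (hp : (a :: t).Pairwise (· < ·)) :
    (PySem.List.max? s (fun x => x)).getD 0 = t.getLastD a ∧
    (PySem.List.min? s (fun x => x)).getD 0 = a := by
  have hsne : s ≠ [] := by
    intro h
    subst h
    exact absurd hperm.length_eq (by simp)
  obtain ⟨c, rest, hcrest⟩ : ∃ c rest, s = c :: rest := by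
    cases s with
    | nil => exact absurd rfl hsne
    | cons c rest => exact ⟨c, rest, rfl⟩
  have hm : (PySem.List.max? s (fun y => y)) = some (List.foldl max c rest) := by
    rw [hcrest]; exact PySem.List.max?_id_cons c rest
  have hn : (PySem.List.min? s (fun y => y)) = some (List.foldl min c rest) := by
    rw [hcrest]; exact PySem.List.min?_id_cons c rest
  set m := List.foldl max c rest
  set n := List.foldl min c rest
  have hmmem : m ∈ a :: t := hperm.mem_iff.mpr (PySem.List.max?_mem hm)
  have hnmem : n ∈ a :: t := hperm.mem_iff.mpr (PySem.List.min?_mem hn)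
  have hlast_mem : t.getLastD a ∈ a :: t := getLastD_mem_cons t a
  have hsorted := le_getLastD_of_pairwise t a hp
  have hmin' : ∀ x ∈ a :: t, a ≤ x := by
    intro x hx
    rcases List.mem_cons.mp hx with rfl | hx2
    · omega
    · exact le_of_lt ((List.pairwise_cons.mp hp).1 x hx2)
  constructor
  · rw [hm, Option.getD_some]
    have h1 : m ≤ t.getLastD a := hsorted m hmmem
    have h2 : t.getLastD a ≤ m :=
      PySem.List.max?_isMax hm _ (hperm.mem_iff.mp hlast_mem)
    exact le_antisymm h1 h2
  · rw [hn, Option.getD_some]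
    have h1 : a ≤ n := hmin' n hnmem
    have h2 : n ≤ a := PySem.List.min?_isMin hn _ (hperm.mem_iff.mp (by simp))
    exact le_antisymm h2 h1

-- ===== VERDICT (by name: the statement is the Claim_ definition above) =====
theorem count_gaps_in_sequence_spec : Claim_equal_count_gaps_in_sequence := by
  intro community _ _
  unfold Spec_count_gaps_in_sequence count_gaps_in_sequence count_gaps_in_sequence_alt
  set s := PySem.Set.ofList (community.map rankOf) with hs
  set values := PySem.List.sorted s (fun x => x) false with hv
  have hperm : values.Perm s := PySem.List.sorted_perm s (fun x => x) false
  have hlen : PySem.List.len values = PySem.List.len s := by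
    simp [PySem.List.len_eq, hperm.length_eq]
  simp only [hlen]
  split_ifs with h
  · rfl
  · have hpw : values.Pairwise (· < ·) := PySem.List.sorted_ofList_pairwise_lt _
    have hvlen : 2 ≤ values.length := by
      simp only [PySem.List.len_eq] at h hlen
      omega
    obtain ⟨a, t, hat⟩ : ∃ a t, values = a :: t :=
      List.exists_cons_of_ne_nil (by
        intro hnil
        rw [hnil] at hvlen
        simp at hvlen)
    rw [← hlen]
    rw [idx_loop_eq_zip values (by simp [hat])]
    rw [hat] at hpw hperm ⊢
    rw [show (a :: t).tail = t from rfl, tele_zip t a 0 hpw]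
    obtain ⟨hmax, hmin⟩ := max_min_of_perm s a t hperm hpw
    rw [hmax, hmin]
    rw [show PySem.List.len (a :: t) = ((t.length : Int) + 1) from by
      rw [PySem.List.len_eq, List.length_cons]; push_cast; ring]
    ring
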